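-- pv_equiv track=rewrite | github.com/carlhinderer/python-exercises | ctci/code/chapter01/src/unique.py | unique_with_set
-- ===== SOURCE A (Python) =====
-- def unique_with_set(s):
--     seen = set()
--     for c in s:
--         if c in seen:
--             return False
--         else:
--             seen.add(c)
--     return True
-- ===== SOURCE B (Python) =====
-- def unique_with_set(s):
--     t = sorted(s)
--     for x, y in zip(t, t[1:]):
--         if x == y:
--             return False
--     return True
-- ===== Notes on version B (the rewrite author's own statement) =====
-- stated objective: idiomatic
-- what changed: Replaces incremental set-membership tracking with a sort followed by an adjacent-equality scan over the sorted copy.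
import Mathlib
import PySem

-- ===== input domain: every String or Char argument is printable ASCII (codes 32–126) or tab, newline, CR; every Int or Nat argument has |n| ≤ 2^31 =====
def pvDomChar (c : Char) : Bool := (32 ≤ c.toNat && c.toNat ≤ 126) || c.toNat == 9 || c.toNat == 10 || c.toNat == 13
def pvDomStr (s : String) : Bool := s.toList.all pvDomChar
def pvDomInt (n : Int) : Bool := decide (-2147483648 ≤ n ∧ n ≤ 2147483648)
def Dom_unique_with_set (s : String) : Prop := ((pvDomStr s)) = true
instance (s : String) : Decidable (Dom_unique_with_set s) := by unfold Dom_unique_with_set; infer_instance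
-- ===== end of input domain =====

-- B replaces A's incremental seen-set membership test with a sort plus adjacent-equality scan (idiomatic alternative, not faster).

-- ===== PORT A =====
-- the for-loop over s with early return, carrying the 'seen' set
def uniqueAux : List Char → PySem.Set Char → Bool
  | [], _ => true
  | c :: r, seen =>
    if PySem.Set.contains seen c then false
    else uniqueAux r (PySem.Set.add seen c)

def unique_with_set (s : String) : Bool := uniqueAux s.toList PySem.Set.empty

-- ===== PORT B =====
-- the 'for x, y in zip(t, t[1:])' loop with early return
def adjScan : List Char → Bool
  | x :: y :: r => if x == y then false else adjScan (y :: r)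
  | _ => true

def unique_with_set_alt (s : String) : Bool :=
  adjScan (PySem.List.sorted s.toList (fun c => c) false)

-- ===== PRECONDITION & SPEC =====
def Spec_unique_with_set (s : String) (out : Bool) : Prop := out = unique_with_set_alt s
instance (s : String) (out : Bool) : Decidable (Spec_unique_with_set s out) := by unfold Spec_unique_with_set; infer_instance

-- ===== CLAIM (what is proved, stated in full; the proofs are below) =====
def Claim_equal_unique_with_set : Prop := ∀ (s : String), Dom_unique_with_set s → Spec_unique_with_set s (unique_with_set s)

-- ===== LEMMAS AND PROOFS =====

-- A's loop returns true iff the remaining chars are distinct and disjoint from 'seen'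
theorem uniqueAux_iff (l : List Char) : ∀ seen : PySem.Set Char,
    uniqueAux l seen = true ↔ l.Nodup ∧ ∀ c ∈ l, c ∉ seen := by
  induction l with
  | nil => intro seen; simp [uniqueAux]
  | cons c r ih =>
    intro seen
    simp only [uniqueAux]
    by_cases h : c ∈ seen
    · rw [(PySem.Set.contains_iff seen c).2 h]
      simp only [if_true, List.nodup_cons]
      constructor
      · intro hf; exact absurd hf (by simp)
      · rintro ⟨_, hall⟩; exact absurd h (hall c (by simp))
    · have hc : PySem.Set.contains seen c = false := by
        cases hc : PySem.Set.contains seen c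
        · rfl
        · exact absurd ((PySem.Set.contains_iff seen c).1 hc) h
      rw [hc]
      simp only [Bool.false_eq_true, if_false, ih, List.nodup_cons, List.forall_mem_cons]
      constructor
      · rintro ⟨hnd, hall⟩
        refine ⟨⟨fun hcr => ?_, hnd⟩, h, fun x hx => ?_⟩
        · exact (hall c hcr) (by simp [PySem.Set.mem_add])
        · intro hmem
          exact (hall x hx) (by simp [PySem.Set.mem_add, hmem])
      · rintro ⟨⟨hcr, hnd⟩, _, hall⟩
        refine ⟨hnd, fun x hx hmem => ?_⟩
        rw [PySem.Set.mem_add] at hmem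
        rcases hmem with hmem | rfl
        · exact hall x hx hmem
        · exact hcr hx

-- B's adjacent scan on a weakly increasing list decides Nodup
theorem adjScan_sorted (l : List Char) (hs : l.Pairwise (· ≤ ·)) :
    adjScan l = true ↔ l.Nodup := by
  induction l with
  | nil => simp [adjScan]
  | cons x t ih =>
    cases t with
    | nil => simp [adjScan]
    | cons y r =>
      simp only [adjScan]
      have hs' : (y :: r).Pairwise (· ≤ ·) := (List.pairwise_cons.1 hs).2
      by_cases hxy : x = y
      · subst hxy
        simp
      · have hbeq : (x == y) = false := by simp [hxy]
        rw [hbeq]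
        simp only [Bool.false_eq_true, if_false, ih hs', List.nodup_cons]
        constructor
        · intro hnd
          refine ⟨fun hx : x ∈ y :: r => ?_, hnd⟩
          have hle := (List.pairwise_cons.1 hs).1
          have hxy' : x < y := lt_of_le_of_ne (hle y (by simp)) hxy
          rcases List.mem_cons.1 hx with rfl | hx
          · exact hxy rfl
          · have hyx : y ≤ x := (List.pairwise_cons.1 hs').1 x hx
            exact absurd (lt_of_lt_of_le hxy' hyx) (lt_irrefl x)
        · rintro ⟨_, hnd⟩; exact hnd

-- ===== VERDICT (by name: the statement is the Claim_ definition above) =====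
theorem unique_with_set_spec : Claim_equal_unique_with_set := by
  intro s _
  show unique_with_set s = unique_with_set_alt s
  rw [Bool.eq_iff_iff]
  unfold unique_with_set unique_with_set_alt
  rw [uniqueAux_iff, adjScan_sorted _ (by
    simpa using PySem.List.sorted_pairwise (xs := s.toList) (key := fun c => c))]
  have hperm := PySem.List.sorted_perm (xs := s.toList) (key := fun c => c) (rev := false)
  constructor
  · rintro ⟨hnd, _⟩; exact hperm.nodup_iff.2 hnd
  · intro hnd
    exact ⟨hperm.nodup_iff.1 hnd, by simp [PySem.Set.empty]⟩
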